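-- pv_equiv track=rewrite | github.com/SamvPy/DeNovo_Benchmark | package_du/denovo_utils/utils/pandas.py | get_species_specificity
-- ===== SOURCE A (Python) =====
-- def get_species_specificity(protein_list: list[str], fasta_dict: dict) -> list[str]:
--     """
--     Return the species matching with the identified peptide.
--
--     Parameter
--     ---------
--     protein_list: list
--         List of protein ids, potentially matching with the value list in
--         fasta_dict.
--     fasta_dict: dict
--         A dictionary of species - protein_id mappings.
--         Generatable with FastaHandler.to_dict().
--
--     Return
--     ------
--     list[str]:
--         The species that match with the identified peptide.
--     """
--     species = []
--     for protein in protein_list: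
--         for organism, org_spec_proteins in fasta_dict.items():
--             if organism in species:
--                 continue
--             if protein in org_spec_proteins:
--                 species.append(organism)
--     return species
-- ===== SOURCE B (Python) =====
-- def get_species_specificity(protein_list: list[str], fasta_dict: dict) -> list[str]:
--     # Reverse index: protein -> organisms owning it (dict order), then one
--     # ordered-dedup pass over the proteins' organisms.
--     index = {}
--     for organism, proteins in fasta_dict.items():
--         for protein in dict.fromkeys(proteins):
--             index.setdefault(protein, []).append(organism)
--     seen = set()
--     species = []
--     for protein in protein_list:
--         for organism in index.get(protein, ()):
--             if organism not in seen:
--                 seen.add(organism)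
--                 species.append(organism)
--     return species
-- ===== Notes on version B (the rewrite author's own statement) =====
-- stated objective: faster
-- what changed: B builds a reverse index protein->organisms over fasta_dict once, then does a single ordered-dedup pass (set for membership) over each protein's organisms, instead of A rescanning every organism's whole protein list (and the species list) for every protein.
import Mathlib
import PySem

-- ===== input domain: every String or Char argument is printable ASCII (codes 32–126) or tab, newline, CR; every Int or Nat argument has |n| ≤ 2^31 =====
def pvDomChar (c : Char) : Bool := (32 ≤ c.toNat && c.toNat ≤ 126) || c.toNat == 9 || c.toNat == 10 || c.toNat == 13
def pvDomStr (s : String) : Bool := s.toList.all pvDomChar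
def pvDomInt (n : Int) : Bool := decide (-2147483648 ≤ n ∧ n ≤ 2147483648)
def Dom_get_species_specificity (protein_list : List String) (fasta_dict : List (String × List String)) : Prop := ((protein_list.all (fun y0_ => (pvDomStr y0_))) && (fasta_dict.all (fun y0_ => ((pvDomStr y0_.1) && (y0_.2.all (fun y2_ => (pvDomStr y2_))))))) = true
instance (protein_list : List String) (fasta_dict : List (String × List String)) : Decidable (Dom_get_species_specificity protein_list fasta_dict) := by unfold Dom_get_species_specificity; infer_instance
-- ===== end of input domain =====

-- B replaces A's nested rescans of the whole fasta_dict per protein by a reverse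
-- index protein -> organisms built once, plus one ordered-dedup pass (objective: faster).

-- ===== PORT A =====
def get_species_specificity (protein_list : List String) (fasta_dict : List (String × List String)) : List String :=
  protein_list.foldl (fun species protein =>
    fasta_dict.foldl (fun species e =>
      if species.contains e.1 then species
      else if e.2.contains protein then species ++ [e.1] else species) species) []

-- ===== PORT B =====
-- index.setdefault(protein, []).append(organism) over dict.fromkeys(proteins)
def pvBuildIndex (fasta_dict : List (String × List String)) : PySem.Dict String (List String) :=
  fasta_dict.foldl (fun index e =>
    (PySem.List.dedup e.2).foldl
      (fun index protein => index.insert protein (index.getD protein [] ++ [e.1])) index)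
    PySem.Dict.empty

def get_species_specificity_alt (protein_list : List String) (fasta_dict : List (String × List String)) : List String :=
  let index := pvBuildIndex fasta_dict
  (protein_list.foldl (fun st protein =>
      (index.getD protein []).foldl
        (fun st organism =>
          if PySem.Set.contains st.1 organism then st
          else (PySem.Set.add st.1 organism, st.2 ++ [organism])) st)
    ((PySem.Set.empty : PySem.Set String), ([] : List String))).2

-- ===== PRECONDITION & SPEC =====
def Spec_get_species_specificity (protein_list : List String) (fasta_dict : List (String × List String)) (out : List String) : Prop := out = get_species_specificity_alt protein_list fasta_dict
instance (protein_list : List String) (fasta_dict : List (String × List String)) (out : List String) : Decidable (Spec_get_species_specificity protein_list fasta_dict out) := by unfold Spec_get_species_specificity; infer_instance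

-- ===== CLAIM (what is proved, stated in full; the proofs are below) =====
def Claim_equal_get_species_specificity : Prop := ∀ (protein_list : List String) (fasta_dict : List (String × List String)), Dom_get_species_specificity protein_list fasta_dict → Spec_get_species_specificity protein_list fasta_dict (get_species_specificity protein_list fasta_dict)

-- ===== LEMMAS AND PROOFS =====

-- organisms whose protein list contains p, in fasta_dict order
def pvOccs (fasta_dict : List (String × List String)) (p : String) : List String :=
  (fasta_dict.filter (fun e => e.2.contains p)).map Prod.fst

-- ordered-dedup step
def pvAdd (s : List String) (o : String) : List String :=
  if s.contains o then s else s ++ [o]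

-- the index build leaves keys not in the dedup list untouched
theorem pvInner_not_mem (o : String) (ds : List String) (d : PySem.Dict String (List String))
    (p : String) (hp : p ∉ ds) :
    (ds.foldl (fun d q => d.insert q (d.getD q [] ++ [o])) d).getD p [] = d.getD p [] := by
  induction ds generalizing d with
  | nil => rfl
  | cons q ds ih =>
    simp only [List.mem_cons, not_or] at hp
    simp only [List.foldl_cons]
    rw [ih _ hp.2, PySem.Dict.getD_insert_of_ne _ _ _ hp.1]

theorem pvInner_getD (o : String) (ds : List String) (hnd : ds.Nodup)
    (d : PySem.Dict String (List String)) (p : String) :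
    (ds.foldl (fun d q => d.insert q (d.getD q [] ++ [o])) d).getD p []
      = d.getD p [] ++ (if p ∈ ds then [o] else []) := by
  induction ds generalizing d with
  | nil => simp
  | cons q ds ih =>
    rcases List.nodup_cons.1 hnd with ⟨hq, hnd'⟩
    simp only [List.foldl_cons]
    by_cases hpq : p = q
    · subst hpq
      rw [pvInner_not_mem _ _ _ _ hq, PySem.Dict.getD_insert_self]
      simp
    · rw [ih hnd', PySem.Dict.getD_insert_of_ne _ _ _ hpq]
      simp [hpq]

theorem pvBuildIndex_getD (fasta_dict : List (String × List String)) (p : String) :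
    (pvBuildIndex fasta_dict).getD p [] = pvOccs fasta_dict p := by
  suffices h : ∀ (fd : List (String × List String)) (d : PySem.Dict String (List String)),
      (fd.foldl (fun index e =>
        (PySem.List.dedup e.2).foldl
          (fun index protein => index.insert protein (index.getD protein [] ++ [e.1])) index) d).getD p []
        = d.getD p [] ++ pvOccs fd p by
    simpa [pvBuildIndex] using h fasta_dict PySem.Dict.empty
  intro fd
  induction fd with
  | nil => simp [pvOccs]
  | cons e fd ih =>
    intro d
    simp only [List.foldl_cons]
    rw [ih, pvInner_getD _ _ (PySem.List.nodup_dedup _)]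
    by_cases hp : p ∈ e.2
    · have hm : p ∈ PySem.List.dedup e.2 := (PySem.List.mem_dedup _ _).2 hp
      simp [pvOccs, hp]
    · have hm : p ∉ PySem.List.dedup e.2 := fun h => hp ((PySem.List.mem_dedup _ _).1 h)
      simp [pvOccs, hp]

-- A's inner scan over fasta_dict equals the dedup fold over pvOccs
theorem pvA_inner (fd : List (String × List String)) (p : String) (s : List String) :
    fd.foldl (fun species e =>
      if species.contains e.1 then species
      else if e.2.contains p then species ++ [e.1] else species) s
      = (pvOccs fd p).foldl pvAdd s := by
  induction fd generalizing s with
  | nil => rfl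
  | cons e fd ih =>
    simp only [List.foldl_cons]
    by_cases hp : p ∈ e.2
    · have h1 : pvOccs (e :: fd) p = e.1 :: pvOccs fd p := by
        simp [pvOccs, hp]
      have h2 : (if s.contains e.1 then s else if e.2.contains p then s ++ [e.1] else s)
          = pvAdd s e.1 := by simp [pvAdd, hp]
      rw [h1, List.foldl_cons, h2, ← ih]
    · have h1 : pvOccs (e :: fd) p = pvOccs fd p := by
        simp [pvOccs, hp]
      have h2 : (if s.contains e.1 then s else if e.2.contains p then s ++ [e.1] else s) = s := by
        simp [hp]
      rw [h1, h2, ← ih]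

-- B's seen-set pass: seen always equals species, and the pair fold is the pvAdd fold
theorem pvB_inner (L : List String) (s : List String) :
    L.foldl (fun st organism =>
      if PySem.Set.contains st.1 organism then st
      else (PySem.Set.add st.1 organism, st.2 ++ [organism])) (s, s)
      = (L.foldl pvAdd s, L.foldl pvAdd s) := by
  induction L generalizing s with
  | nil => rfl
  | cons o L ih =>
    have hstep : (if PySem.Set.contains ((s, s) : PySem.Set String × List String).1 o
          then ((s, s) : PySem.Set String × List String)
          else (PySem.Set.add ((s, s) : PySem.Set String × List String).1 o, ((s, s) : PySem.Set String × List String).2 ++ [o]))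
        = ((pvAdd s o, pvAdd s o) : PySem.Set String × List String) := by
      simp only [pvAdd, PySem.Set.add_eq_ite, PySem.Set.contains_eq_listContains]
      by_cases h : o ∈ s <;> simp [h]
    rw [List.foldl_cons]
    exact hstep ▸ ih (pvAdd s o)

theorem pv_main (pl : List String) (fd : List (String × List String)) (s : List String) :
    pl.foldl (fun species protein =>
      fd.foldl (fun species e =>
        if species.contains e.1 then species
        else if e.2.contains protein then species ++ [e.1] else species) species) s
      = (pl.foldl (fun st protein =>
          ((pvBuildIndex fd).getD protein []).foldl
            (fun st organism =>
              if PySem.Set.contains st.1 organism then st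
              else (PySem.Set.add st.1 organism, st.2 ++ [organism])) st) (s, s)).2 := by
  induction pl generalizing s with
  | nil => rfl
  | cons p pl ih =>
    simp only [List.foldl_cons]
    rw [pvBuildIndex_getD, pvB_inner, pvA_inner, ih]

-- ===== VERDICT (by name: the statement is the Claim_ definition above) =====
theorem get_species_specificity_spec : Claim_equal_get_species_specificity := by
  intro protein_list fasta_dict _
  unfold Spec_get_species_specificity get_species_specificity get_species_specificity_alt
  exact pv_main protein_list fasta_dict []
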